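-- pv_equiv track=rewrite | github.com/quaesito/2048_game | game_logic.py | get_potential_merges
-- ===== SOURCE A (Python) =====
-- def get_potential_merges(board):
--     """
--     Calculate potential merge opportunities.
--     """
--     merge_score = 0
--
--     # Check for adjacent equal tiles
--     for r in range(4):
--         for c in range(4):
--             if board[r][c] is not None:
--                 current_value = board[r][c]
--
--                 # Check all directions
--                 directions = [(0, 1), (1, 0), (0, -1), (-1, 0)]
--                 for dr, dc in directions:
--                     nr, nc = r + dr, c + dc
--                     if 0 <= nr < 4 and 0 <= nc < 4:
--                         if board[nr][nc] == current_value: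
--                             # Found a potential merge
--                             merge_score += current_value * 2
--
--     return merge_score
-- ===== SOURCE B (Python) =====
-- def get_potential_merges(board):
--     """
--     Calculate potential merge opportunities.
--     """
--     score = 0
--     # horizontal edges: each matching edge was counted from both sides in A,
--     # contributing value*2 twice, hence value*4 per edge
--     for r in range(4):
--         for c in range(3):
--             a = board[r][c]
--             if a is not None and a == board[r][c + 1]:
--                 score += a * 4
--     # vertical edges
--     for c in range(4):
--         for r in range(3):
--             a = board[r][c]
--             if a is not None and a == board[r + 1][c]:
--                 score += a * 4
--     return score
-- ===== Notes on version B (the rewrite author's own statement) =====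
-- stated objective: simpler
-- what changed: Instead of scanning every cell's four neighbours (counting each adjacency twice), B scans each of the 24 undirected edges of the 4x4 grid once and adds value*4 per matching edge.
import Mathlib
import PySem

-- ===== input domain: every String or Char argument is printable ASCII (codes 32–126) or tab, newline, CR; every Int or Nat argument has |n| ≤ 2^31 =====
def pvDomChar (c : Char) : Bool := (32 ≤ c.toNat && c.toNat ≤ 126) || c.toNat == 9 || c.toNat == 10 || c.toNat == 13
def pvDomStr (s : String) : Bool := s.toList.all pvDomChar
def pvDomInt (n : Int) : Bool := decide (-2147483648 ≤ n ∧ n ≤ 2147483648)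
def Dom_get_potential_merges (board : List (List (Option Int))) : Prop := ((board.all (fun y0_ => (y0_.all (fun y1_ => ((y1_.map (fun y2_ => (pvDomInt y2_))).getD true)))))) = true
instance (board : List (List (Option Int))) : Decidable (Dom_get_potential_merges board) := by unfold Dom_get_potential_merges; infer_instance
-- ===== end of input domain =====

-- B sums each undirected grid edge once (adding value*4 per matching pair) instead of
-- scanning each cell's four directions (which counts every adjacency twice at value*2).
-- Both ports read board[r][c] through pvCell; Pre_ guarantees the indices are in range.

-- shared indexing helper: board[r][c] (both Pythons index the same way; under
-- Pre_ every access is in range, so the defaults are never exercised)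
def pvCell (board : List (List (Option Int))) (r c : Int) : Option Int :=
  PySem.List.pyGetD (PySem.List.pyGetD board r []) c none

-- ===== PORT A =====
def get_potential_merges (board : List (List (Option Int))) : Int :=
  (PySem.List.pyRange 0 4 1).foldl (fun ms r =>
    (PySem.List.pyRange 0 4 1).foldl (fun ms c =>
      match pvCell board r c with
      | none => ms
      | some v =>
        ([((0:Int),(1:Int)), (1,0), (0,-1), (-1,0)]).foldl (fun ms d =>
          if 0 ≤ r + d.1 ∧ r + d.1 < 4 ∧ 0 ≤ c + d.2 ∧ c + d.2 < 4 then
            (if pvCell board (r + d.1) (c + d.2) = some v then ms + v * 2 else ms)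
          else ms) ms) ms) 0

-- ===== PORT B =====
def get_potential_merges_alt (board : List (List (Option Int))) : Int :=
  let s1 := (PySem.List.pyRange 0 4 1).foldl (fun (s : Int) r =>
    (PySem.List.pyRange 0 3 1).foldl (fun (s : Int) c =>
      match pvCell board r c with
      | none => s
      | some a => if pvCell board r (c+1) = some a then s + a * 4 else s) s) 0
  (PySem.List.pyRange 0 4 1).foldl (fun (s : Int) c =>
    (PySem.List.pyRange 0 3 1).foldl (fun (s : Int) r =>
      match pvCell board r c with
      | none => s
      | some a => if pvCell board (r+1) c = some a then s + a * 4 else s) s) s1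

-- ===== PRECONDITION & SPEC =====
-- A indexes board[r][c] for r,c in 0..3, so it raises IndexError unless the board has
-- at least 4 rows whose first 4 rows each have at least 4 entries; Pre_ states exactly that.
def Pre_get_potential_merges (board : List (List (Option Int))) : Prop :=
  4 ≤ board.length ∧ ∀ row ∈ board.take 4, 4 ≤ row.length
instance (board : List (List (Option Int))) : Decidable (Pre_get_potential_merges board) := by
  unfold Pre_get_potential_merges; infer_instance

def pvWitness_get_potential_merges : List (List (Option Int)) :=
  [[some 2, some 2, none, some 4], [none, none, some 4, some 4],
   [some 8, none, some 2, none], [some 2, some 2, some 2, some 2]]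

def Spec_get_potential_merges (board : List (List (Option Int))) (out : Int) : Prop := out = get_potential_merges_alt board
instance (board : List (List (Option Int))) (out : Int) : Decidable (Spec_get_potential_merges board out) := by unfold Spec_get_potential_merges; infer_instance

-- ===== CLAIM (what is proved, stated in full; the proofs are below) =====
def Claim_equal_get_potential_merges : Prop := ∀ (board : List (List (Option Int))), Dom_get_potential_merges board → Pre_get_potential_merges board → Spec_get_potential_merges board (get_potential_merges board)

-- ===== LEMMAS AND PROOFS =====

-- directed contribution of A: cell x looking at neighbour y
def dA (x y : Option Int) : Int :=
  match x with
  | none => 0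
  | some v => if y = some v then v * 2 else 0

-- per-edge contribution of B
def dB (x y : Option Int) : Int :=
  match x with
  | none => 0
  | some a => if y = some a then a * 4 else 0

lemma dB_eq_dA_add (x y : Option Int) : dB x y = dA x y + dA y x := by
  cases x with
  | none => cases y <;> simp [dA, dB]
  | some v =>
    cases y with
    | none => simp [dA, dB]
    | some w =>
      by_cases h : w = v
      · subst h; simp [dA, dB]; ring
      · have h' : v ≠ w := fun hh => h hh.symm
        simp [dA, dB, h, h']

-- the value A's direction loop adds for the cell (r,c) holding v
def dirsum (board : List (List (Option Int))) (r c v : Int) : Int :=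
  (if 0 ≤ r + 0 ∧ r + 0 < 4 ∧ 0 ≤ c + 1 ∧ c + 1 < 4 then (if pvCell board (r + 0) (c + 1) = some v then v * 2 else 0) else 0)
  + (if 0 ≤ r + 1 ∧ r + 1 < 4 ∧ 0 ≤ c + 0 ∧ c + 0 < 4 then (if pvCell board (r + 1) (c + 0) = some v then v * 2 else 0) else 0)
  + (if 0 ≤ r + -1 ∧ r + -1 < 4 ∧ 0 ≤ c + 0 ∧ c + 0 < 4 then (if pvCell board (r + -1) (c + 0) = some v then v * 2 else 0) else 0)
  + (if 0 ≤ r + 0 ∧ r + 0 < 4 ∧ 0 ≤ c + -1 ∧ c + -1 < 4 then (if pvCell board (r + 0) (c + -1) = some v then v * 2 else 0) else 0)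

set_option maxHeartbeats 1000000 in
lemma dirfold (board : List (List (Option Int))) (r c v ms : Int) :
    ([((0:Int),(1:Int)), (1,0), (0,-1), (-1,0)]).foldl (fun ms d =>
      if 0 ≤ r + d.1 ∧ r + d.1 < 4 ∧ 0 ≤ c + d.2 ∧ c + d.2 < 4 then
        (if pvCell board (r + d.1) (c + d.2) = some v then ms + v * 2 else ms)
      else ms) ms = ms + dirsum board r c v := by
  simp only [List.foldl, dirsum]
  split_ifs <;> ring

-- total A contribution of cell (r,c); after dirfold the cell step is ms + cellA board r c
def cellA (board : List (List (Option Int))) (r c : Int) : Int :=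
  match pvCell board r c with
  | none => 0
  | some v => dirsum board r c v

lemma cellfold (board : List (List (Option Int))) (r c ms : Int) :
    (match pvCell board r c with
     | none => ms
     | some v => ms + dirsum board r c v) = ms + cellA board r c := by
  cases hx : pvCell board r c <;> simp [cellA, hx]

def cellBH (board : List (List (Option Int))) (r c : Int) : Int :=
  dB (pvCell board r c) (pvCell board r (c+1))

def cellBV (board : List (List (Option Int))) (r c : Int) : Int :=
  dB (pvCell board r c) (pvCell board (r+1) c)

lemma bstepH (board : List (List (Option Int))) (r c s : Int) :
    (match pvCell board r c with
     | none => s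
     | some a => if pvCell board r (c+1) = some a then s + a * 4 else s) = s + cellBH board r c := by
  cases hx : pvCell board r c <;> simp [cellBH, dB, hx] <;> split_ifs <;> ring

lemma bstepV (board : List (List (Option Int))) (r c s : Int) :
    (match pvCell board r c with
     | none => s
     | some a => if pvCell board (r+1) c = some a then s + a * 4 else s) = s + cellBV board r c := by
  cases hx : pvCell board r c <;> simp [cellBV, dB, hx] <;> split_ifs <;> ring

-- per-cell shapes after the range conditions are decided (corner / edge / inner cells)
lemma cellsum2 (x y1 y2 : Option Int) :
    (match x with
     | none => (0:Int)
     | some v => (if y1 = some v then v * 2 else 0) + (if y2 = some v then v * 2 else 0))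
    = dA x y1 + dA x y2 := by
  cases x <;> simp [dA]

lemma cellsum3 (x y1 y2 y3 : Option Int) :
    (match x with
     | none => (0:Int)
     | some v => (if y1 = some v then v * 2 else 0) + (if y2 = some v then v * 2 else 0)
                 + (if y3 = some v then v * 2 else 0))
    = dA x y1 + dA x y2 + dA x y3 := by
  cases x <;> simp [dA]

lemma cellsum4 (x y1 y2 y3 y4 : Option Int) :
    (match x with
     | none => (0:Int)
     | some v => (if y1 = some v then v * 2 else 0) + (if y2 = some v then v * 2 else 0)
                 + (if y3 = some v then v * 2 else 0) + (if y4 = some v then v * 2 else 0))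
    = dA x y1 + dA x y2 + dA x y3 + dA x y4 := by
  cases x <;> simp [dA]

lemma pvCell_00 (x00 x01 x02 x03 x10 x11 x12 x13 x20 x21 x22 x23 x30 x31 x32 x33 : Option Int) (t0 t1 t2 t3 : List (Option Int)) (rest : List (List (Option Int))) :
    pvCell ((x00::x01::x02::x03::t0)::(x10::x11::x12::x13::t1)::(x20::x21::x22::x23::t2)::(x30::x31::x32::x33::t3)::rest) 0 0 = x00 := by
  simp [pvCell, pysem]

lemma pvCell_01 (x00 x01 x02 x03 x10 x11 x12 x13 x20 x21 x22 x23 x30 x31 x32 x33 : Option Int) (t0 t1 t2 t3 : List (Option Int)) (rest : List (List (Option Int))) :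
    pvCell ((x00::x01::x02::x03::t0)::(x10::x11::x12::x13::t1)::(x20::x21::x22::x23::t2)::(x30::x31::x32::x33::t3)::rest) 0 1 = x01 := by
  simp [pvCell, pysem]

lemma pvCell_02 (x00 x01 x02 x03 x10 x11 x12 x13 x20 x21 x22 x23 x30 x31 x32 x33 : Option Int) (t0 t1 t2 t3 : List (Option Int)) (rest : List (List (Option Int))) :
    pvCell ((x00::x01::x02::x03::t0)::(x10::x11::x12::x13::t1)::(x20::x21::x22::x23::t2)::(x30::x31::x32::x33::t3)::rest) 0 2 = x02 := by
  simp [pvCell, pysem]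

lemma pvCell_03 (x00 x01 x02 x03 x10 x11 x12 x13 x20 x21 x22 x23 x30 x31 x32 x33 : Option Int) (t0 t1 t2 t3 : List (Option Int)) (rest : List (List (Option Int))) :
    pvCell ((x00::x01::x02::x03::t0)::(x10::x11::x12::x13::t1)::(x20::x21::x22::x23::t2)::(x30::x31::x32::x33::t3)::rest) 0 3 = x03 := by
  simp [pvCell, pysem]

lemma pvCell_10 (x00 x01 x02 x03 x10 x11 x12 x13 x20 x21 x22 x23 x30 x31 x32 x33 : Option Int) (t0 t1 t2 t3 : List (Option Int)) (rest : List (List (Option Int))) :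
    pvCell ((x00::x01::x02::x03::t0)::(x10::x11::x12::x13::t1)::(x20::x21::x22::x23::t2)::(x30::x31::x32::x33::t3)::rest) 1 0 = x10 := by
  simp [pvCell, pysem]

lemma pvCell_11 (x00 x01 x02 x03 x10 x11 x12 x13 x20 x21 x22 x23 x30 x31 x32 x33 : Option Int) (t0 t1 t2 t3 : List (Option Int)) (rest : List (List (Option Int))) :
    pvCell ((x00::x01::x02::x03::t0)::(x10::x11::x12::x13::t1)::(x20::x21::x22::x23::t2)::(x30::x31::x32::x33::t3)::rest) 1 1 = x11 := by
  simp [pvCell, pysem]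

lemma pvCell_12 (x00 x01 x02 x03 x10 x11 x12 x13 x20 x21 x22 x23 x30 x31 x32 x33 : Option Int) (t0 t1 t2 t3 : List (Option Int)) (rest : List (List (Option Int))) :
    pvCell ((x00::x01::x02::x03::t0)::(x10::x11::x12::x13::t1)::(x20::x21::x22::x23::t2)::(x30::x31::x32::x33::t3)::rest) 1 2 = x12 := by
  simp [pvCell, pysem]

lemma pvCell_13 (x00 x01 x02 x03 x10 x11 x12 x13 x20 x21 x22 x23 x30 x31 x32 x33 : Option Int) (t0 t1 t2 t3 : List (Option Int)) (rest : List (List (Option Int))) :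
    pvCell ((x00::x01::x02::x03::t0)::(x10::x11::x12::x13::t1)::(x20::x21::x22::x23::t2)::(x30::x31::x32::x33::t3)::rest) 1 3 = x13 := by
  simp [pvCell, pysem]

lemma pvCell_20 (x00 x01 x02 x03 x10 x11 x12 x13 x20 x21 x22 x23 x30 x31 x32 x33 : Option Int) (t0 t1 t2 t3 : List (Option Int)) (rest : List (List (Option Int))) :
    pvCell ((x00::x01::x02::x03::t0)::(x10::x11::x12::x13::t1)::(x20::x21::x22::x23::t2)::(x30::x31::x32::x33::t3)::rest) 2 0 = x20 := by
  simp [pvCell, pysem]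

lemma pvCell_21 (x00 x01 x02 x03 x10 x11 x12 x13 x20 x21 x22 x23 x30 x31 x32 x33 : Option Int) (t0 t1 t2 t3 : List (Option Int)) (rest : List (List (Option Int))) :
    pvCell ((x00::x01::x02::x03::t0)::(x10::x11::x12::x13::t1)::(x20::x21::x22::x23::t2)::(x30::x31::x32::x33::t3)::rest) 2 1 = x21 := by
  simp [pvCell, pysem]

lemma pvCell_22 (x00 x01 x02 x03 x10 x11 x12 x13 x20 x21 x22 x23 x30 x31 x32 x33 : Option Int) (t0 t1 t2 t3 : List (Option Int)) (rest : List (List (Option Int))) :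
    pvCell ((x00::x01::x02::x03::t0)::(x10::x11::x12::x13::t1)::(x20::x21::x22::x23::t2)::(x30::x31::x32::x33::t3)::rest) 2 2 = x22 := by
  simp [pvCell, pysem]

lemma pvCell_23 (x00 x01 x02 x03 x10 x11 x12 x13 x20 x21 x22 x23 x30 x31 x32 x33 : Option Int) (t0 t1 t2 t3 : List (Option Int)) (rest : List (List (Option Int))) :
    pvCell ((x00::x01::x02::x03::t0)::(x10::x11::x12::x13::t1)::(x20::x21::x22::x23::t2)::(x30::x31::x32::x33::t3)::rest) 2 3 = x23 := by
  simp [pvCell, pysem]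

lemma pvCell_30 (x00 x01 x02 x03 x10 x11 x12 x13 x20 x21 x22 x23 x30 x31 x32 x33 : Option Int) (t0 t1 t2 t3 : List (Option Int)) (rest : List (List (Option Int))) :
    pvCell ((x00::x01::x02::x03::t0)::(x10::x11::x12::x13::t1)::(x20::x21::x22::x23::t2)::(x30::x31::x32::x33::t3)::rest) 3 0 = x30 := by
  simp [pvCell, pysem]

lemma pvCell_31 (x00 x01 x02 x03 x10 x11 x12 x13 x20 x21 x22 x23 x30 x31 x32 x33 : Option Int) (t0 t1 t2 t3 : List (Option Int)) (rest : List (List (Option Int))) :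
    pvCell ((x00::x01::x02::x03::t0)::(x10::x11::x12::x13::t1)::(x20::x21::x22::x23::t2)::(x30::x31::x32::x33::t3)::rest) 3 1 = x31 := by
  simp [pvCell, pysem]

lemma pvCell_32 (x00 x01 x02 x03 x10 x11 x12 x13 x20 x21 x22 x23 x30 x31 x32 x33 : Option Int) (t0 t1 t2 t3 : List (Option Int)) (rest : List (List (Option Int))) :
    pvCell ((x00::x01::x02::x03::t0)::(x10::x11::x12::x13::t1)::(x20::x21::x22::x23::t2)::(x30::x31::x32::x33::t3)::rest) 3 2 = x32 := by
  simp [pvCell, pysem]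

lemma pvCell_33 (x00 x01 x02 x03 x10 x11 x12 x13 x20 x21 x22 x23 x30 x31 x32 x33 : Option Int) (t0 t1 t2 t3 : List (Option Int)) (rest : List (List (Option Int))) :
    pvCell ((x00::x01::x02::x03::t0)::(x10::x11::x12::x13::t1)::(x20::x21::x22::x23::t2)::(x30::x31::x32::x33::t3)::rest) 3 3 = x33 := by
  simp [pvCell, pysem]

lemma main_eq (x00 x01 x02 x03 x10 x11 x12 x13 x20 x21 x22 x23 x30 x31 x32 x33 : Option Int) (t0 t1 t2 t3 : List (Option Int)) (rest : List (List (Option Int))) :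
    get_potential_merges ((x00::x01::x02::x03::t0)::(x10::x11::x12::x13::t1)::(x20::x21::x22::x23::t2)::(x30::x31::x32::x33::t3)::rest) = get_potential_merges_alt ((x00::x01::x02::x03::t0)::(x10::x11::x12::x13::t1)::(x20::x21::x22::x23::t2)::(x30::x31::x32::x33::t3)::rest) := by
  have hr4 : PySem.List.pyRange 0 4 1 = [0,1,2,3] := by decide
  have hr3 : PySem.List.pyRange 0 3 1 = [0,1,2] := by decide
  rw [get_potential_merges, get_potential_merges_alt]
  simp only [hr4, hr3, dirfold, cellfold, bstepH, bstepV, PySem.List.foldl_add]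
  simp only [List.map, List.sum_cons, List.sum_nil]
  simp only [cellA, cellBH, cellBV, dirsum]
  norm_num [pvCell_00, pvCell_01, pvCell_02, pvCell_03, pvCell_10, pvCell_11, pvCell_12, pvCell_13, pvCell_20, pvCell_21, pvCell_22, pvCell_23, pvCell_30, pvCell_31, pvCell_32, pvCell_33]
  simp only [cellsum2, cellsum3, cellsum4, dB_eq_dA_add]
  ring

-- ===== VERDICT (by name: the statement is the Claim_ definition above) =====
theorem get_potential_merges_spec : Claim_equal_get_potential_merges := by
  intro board _ hpre
  unfold Spec_get_potential_merges
  obtain ⟨hlen, hrows⟩ := hpre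
  match board, hlen with
  | r0 :: r1 :: r2 :: r3 :: rest, _ =>
    have h0 : 4 ≤ r0.length := hrows r0 (by simp)
    have h1 : 4 ≤ r1.length := hrows r1 (by simp)
    have h2 : 4 ≤ r2.length := hrows r2 (by simp)
    have h3 : 4 ≤ r3.length := hrows r3 (by simp)
    match r0, h0 with
    | x00 :: x01 :: x02 :: x03 :: t0, _ =>
    match r1, h1 with
    | x10 :: x11 :: x12 :: x13 :: t1, _ =>
    match r2, h2 with
    | x20 :: x21 :: x22 :: x23 :: t2, _ =>
    match r3, h3 with
    | x30 :: x31 :: x32 :: x33 :: t3, _ =>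
      exact main_eq x00 x01 x02 x03 x10 x11 x12 x13 x20 x21 x22 x23 x30 x31 x32 x33 t0 t1 t2 t3 rest
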